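-- pv_equiv track=rewrite | github.com/tomprzybylowski/coxeter | score_sequences.py | majorized_sequences
-- ===== SOURCE A (Python) =====
-- from itertools import combinations_with_replacement, product
--
-- def is_majorized(x, y, weakly):
--     """ Return True if x is majorized by y.
--     Weakly = False requires further sum(x) == sum(y) """
--
--     sorted_x = sorted(x, reverse=True) # Sorted in decreasing order
--     sorted_y = sorted(y, reverse=True)
--
--     if len(x) != len(y):
--         raise ValueError("Lengths of vectors are distinct!")
--
--     # Check the prefix sums condition
--     prefix_sum_x = 0
--     prefix_sum_y = 0
--     for i in range(len(x)):
--         prefix_sum_x += sorted_x[i]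
--         prefix_sum_y += sorted_y[i]
--         if prefix_sum_x > prefix_sum_y:
--             return False
--     if weakly == True or prefix_sum_x == prefix_sum_y:
--         return True
--     else:
--         return False
--
-- def majorized_sequences(s, weakly):
--     """ Return a list of non-negative non-increasing sequences which are majorized
--     by sequence s """
--
--     # List to store all weakly-majorized sequences
--     result = []
--
--     n = len(s)
--     max_val = max(s)
--
--     # Generate all possible non-increasing sequences of length n
--     possible_sequences = combinations_with_replacement(range(max_val + 1), n)
--
--     # Check each non-increasing sequence if it is weakly-majorized by s
--     for candidate in possible_sequences:
--         candidate = sorted(candidate, reverse=True)  # Ensure the sequence is non-increasing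
--         if is_majorized(candidate, s, weakly):
--             result.append(candidate)
--
--     # Remove duplicates and sort the result
--     result = [list(seq) for seq in set(tuple(seq) for seq in result)]
--
--     return result
-- ===== SOURCE B (Python) =====
-- def majorized_sequences(s, weakly):
--     """ Return a list of non-negative non-increasing sequences which are majorized
--     by sequence s (pruned DFS over non-decreasing reversals instead of
--     enumerating every combination and re-sorting/re-summing each one). """
--     n = len(s)
--     t = sorted(s, reverse=True)
--     pre = []
--     acc = 0
--     for v in t:
--         acc += v
--         pre.append(acc)
--     total = acc
--     m = t[0]
--
--     def ok(cand):
--         ps = 0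
--         for c, p in zip(cand, pre):
--             ps += c
--             if ps > p:
--                 return False
--         return weakly or ps == total
--
--     result = []
--
--     def dfs(k, prev, q, rev):
--         # rev is the candidate suffix built so far (non-increasing); q = sum(rev);
--         # k slots remain, each to be filled with a value >= prev.
--         if k == 0:
--             if ok(rev):
--                 result.append(rev)
--             return
--         for v in range(prev, m + 1):
--             if q + v * k > total:
--                 break  # any completion would exceed the total prefix-sum bound
--             dfs(k - 1, v, q + v, [v] + rev)
--
--     dfs(n, 0, 0, [])
--     return [list(seq) for seq in set(tuple(seq) for seq in result)]
-- ===== Notes on version B (the rewrite author's own statement) =====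
-- stated objective: alternative
-- what changed: A enumerates all C(max_val+n,n) combinations_with_replacement, re-sorting and re-prefix-summing each candidate; B precomputes the sorted target's prefix sums once and runs a pruned depth-first search that only explores candidates whose running sum can still satisfy the total prefix-sum bound, finishing with the same set() step so the output order is identical.
import Mathlib
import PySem

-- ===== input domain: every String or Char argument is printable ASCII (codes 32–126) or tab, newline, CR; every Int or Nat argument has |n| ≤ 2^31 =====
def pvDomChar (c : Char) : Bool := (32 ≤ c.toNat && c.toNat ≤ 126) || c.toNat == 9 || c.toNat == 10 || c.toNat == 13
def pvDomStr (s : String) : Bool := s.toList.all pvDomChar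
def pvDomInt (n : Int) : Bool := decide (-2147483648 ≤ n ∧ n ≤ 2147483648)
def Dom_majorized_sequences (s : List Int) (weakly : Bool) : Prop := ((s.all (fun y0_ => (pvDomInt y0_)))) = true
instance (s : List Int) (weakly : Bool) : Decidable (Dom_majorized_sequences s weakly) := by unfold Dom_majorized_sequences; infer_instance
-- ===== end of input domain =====

-- B replaces A's exhaustive enumeration of all C(max+n,n) combinations (each re-sorted and
-- re-summed) by a pruned DFS over the reversed candidates with precomputed prefix sums;
-- both end with Python's `[list(seq) for seq in set(tuple(seq) for seq in result)]`,
-- whose (deterministic, seed-independent for int tuples) CPython set iteration order is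
-- modelled exactly by the shared helper `pySetOrder` below.

-- ===== SHARED HELPER: CPython set-of-int-tuples iteration order =====
-- Python's `set(...)` of tuples of ints is a construct PySem does not cover; it is ported
-- by hand, step for step after CPython's setobject.c / tupleobject.c (validated against
-- CPython 3.11): xxHash-based tuple hash (ints hash to themselves — exact for
-- 0 ≤ x < 2^61-1, which holds for the non-negative candidate entries here, |s_i| ≤ 2^31),
-- open addressing with LINEAR_PROBES = 9, growth ×4 at load ≥ 3/5.  The keys inserted by
-- both programs are pairwise distinct, so insertion = "first empty slot on the probe
-- sequence" (the equality branch of set_add_entry never fires).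
def pyIntHash (x : Int) : UInt64 := UInt64.ofNat x.toNat  -- exact for 0 ≤ x < 2^61-1

def pyTupleHash (t : List Int) : UInt64 :=
  let acc := t.foldl (fun acc x =>
    let acc := acc + pyIntHash x * 14029467366897019727
    let acc := (acc <<< 31) ||| (acc >>> 33)
    acc * 11400714785074694791) 2870177450012600261
  let acc := acc + (UInt64.ofNat t.length ^^^ (2870177450012600261 ^^^ 3527539))
  if acc = 18446744073709551615 then 1546275796 else acc

-- first empty slot among table[start], …, table[start+extra] (the linear-probe window)
def setFirstFree (table : List (Option (UInt64 × List Int))) : Nat → Nat → Option Nat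
  | start, 0 => if (table.getD start none).isNone then some start else none
  | start, extra+1 =>
    if (table.getD start none).isNone then some start else setFirstFree table (start+1) extra

-- the probe loop of set_add_entry/set_insert_clean; fuel is generous (the table always
-- keeps an empty slot, so the loop terminates long before the fuel runs out)
def setProbeIns (mask h : UInt64) (key : List Int) :
    Nat → UInt64 → UInt64 → List (Option (UInt64 × List Int)) → List (Option (UInt64 × List Int))
  | 0, _, _, table => table  -- fuel exhausted: unreachable
  | fuel+1, i, perturb, table =>
    let probes : Nat := if i + 9 ≤ mask then 9 else 0
    match setFirstFree table i.toNat probes with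
    | some slot => table.set slot (some (h, key))
    | none =>
      let perturb := perturb >>> 5
      setProbeIns mask h key fuel ((i * 5 + 1 + perturb) &&& mask) perturb table

-- `while newsize <= minused: newsize <<= 1` starting from PySet_MINSIZE = 8
def setGrowSize (minused : Nat) : Nat → Nat → Nat
  | sz, 0 => sz
  | sz, fuel+1 => if sz ≤ minused then setGrowSize minused (sz * 2) fuel else sz

def setRebuild (entries : List (UInt64 × List Int)) (size : Nat) :
    List (Option (UInt64 × List Int)) :=
  entries.foldl (fun tb e =>
      setProbeIns (UInt64.ofNat (size - 1)) e.1 e.2 (size * 2 + 64)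
        (e.1 &&& UInt64.ofNat (size - 1)) e.1 tb)
    (List.replicate size none)

-- list(set(items)) for a duplicate-free list of int tuples, in CPython's iteration order
def pySetOrder (items : List (List Int)) : List (List Int) :=
  let st := items.foldl (fun (st : List (Option (UInt64 × List Int)) × Nat) key =>
      let table := st.1
      let fill := st.2 + 1
      let size := table.length
      let mask := UInt64.ofNat (size - 1)
      let h := pyTupleHash key
      let table := setProbeIns mask h key (size * 2 + 64) (h &&& mask) h table
      if fill * 5 ≥ (size - 1) * 3 then
        let minused := if fill ≤ 50000 then fill * 4 else fill * 2
        (setRebuild (table.filterMap id) (setGrowSize minused 8 64), fill)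
      else (table, fill))
    (List.replicate 8 (none : Option (UInt64 × List Int)), 0)
  (st.1.filterMap id).map (fun e => e.2)

-- ===== PORT A =====
-- itertools.combinations_with_replacement(xs, r), lexicographic order
def cwr {α : Type} : List α → Nat → List (List α)
  | _, 0 => [[]]
  | [], _+1 => []
  | x :: xs, r+1 => (cwr (x :: xs) r).map (x :: ·) ++ cwr xs (r+1)

-- the `for i in range(len(x))` prefix-sum loop of is_majorized (early `return False`)
def majPrefixLoop (sx sy : List Int) (weakly : Bool) : List Int → Int → Int → Bool
  | [], px, py => weakly || decide (px = py)
  | i :: rest, px, py =>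
    let px := px + PySem.List.pyGetD sx i 0   -- indices are in range: i < len(x) = len(sx)
    let py := py + PySem.List.pyGetD sy i 0
    if px > py then false else majPrefixLoop sx sy weakly rest px py

-- is_majorized; `none` = the ValueError on distinct lengths (never reached from
-- majorized_sequences, whose candidates always have length len(s))
def is_majorized (x y : List Int) (weakly : Bool) : Option Bool :=
  let sorted_x := PySem.List.sorted x (fun v => v) true
  let sorted_y := PySem.List.sorted y (fun v => v) true
  if PySem.List.len x ≠ PySem.List.len y then none
  else some (majPrefixLoop sorted_x sorted_y weakly (PySem.List.pyRange 0 (PySem.List.len x) 1) 0 0)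

def majorized_sequences (s : List Int) (weakly : Bool) : List (List Int) :=
  match PySem.List.max? s (fun v => v) with
  | none => []  -- unreachable under Pre_: Python's max([]) raises ValueError
  | some max_val =>
    let n := s.length
    let result := (cwr (PySem.List.pyRange 0 (max_val + 1) 1) n).foldl (fun res candidate =>
        let candidate := PySem.List.sorted candidate (fun v => v) true
        match is_majorized candidate s weakly with
        | some b => if b then res ++ [candidate] else res
        | none => res)  -- unreachable: lengths always agree
      []
    pySetOrder result

-- ===== PORT B =====
-- pre = []; acc = 0; for v in t: acc += v; pre.append(acc)
def preAcc : List Int → Int → List Int → (List Int × Int)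
  | [], acc, pre => (pre, acc)
  | v :: vs, acc, pre => preAcc vs (acc + v) (pre ++ [acc + v])

-- ok(cand): the zip prefix-check loop
def okLoop (weakly : Bool) (total : Int) : List (Int × Int) → Int → Bool
  | [], ps => weakly || decide (ps = total)
  | cp :: rest, ps =>
    if ps + cp.1 > cp.2 then false else okLoop weakly total rest (ps + cp.1)

mutual
def dfsB (weakly : Bool) (pre : List Int) (total m : Int) :
    Nat → Int → Int → List Int → List (List Int) → List (List Int)
  | 0, _prev, _q, rev, res =>
    if okLoop weakly total (rev.zip pre) 0 then res ++ [rev] else res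
  | k+1, prev, q, rev, res =>
    dfsLoop weakly pre total m k (PySem.List.pyRange prev (m + 1) 1) q rev res
  termination_by k _ _ _ _ => (k + 1, 0)

def dfsLoop (weakly : Bool) (pre : List Int) (total m : Int) (k : Nat) :
    List Int → Int → List Int → List (List Int) → List (List Int)
  | [], _q, _rev, res => res
  | v :: vs, q, rev, res =>
    if q + v * ((k : Int) + 1) > total then res  -- `break`: prune
    else dfsLoop weakly pre total m k vs q rev (dfsB weakly pre total m k v (q + v) (v :: rev) res)
  termination_by vs _ _ _ => (k + 1, vs.length + 1)
end

def majorized_sequences_alt (s : List Int) (weakly : Bool) : List (List Int) :=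
  let n := s.length
  let t := PySem.List.sorted s (fun v => v) true
  let pt := preAcc t 0 []
  match PySem.List.pyGet? t 0 with
  | none => []  -- unreachable under Pre_: Python's t[0] raises IndexError on empty s
  | some m =>
    pySetOrder (dfsB weakly pt.1 pt.2 m n 0 0 [] [])

-- ===== PRECONDITION & SPEC =====
-- Pre_ excludes only the empty list, on which Python A raises ValueError (max of empty sequence).
def Pre_majorized_sequences (s : List Int) (weakly : Bool) : Prop := s ≠ []
instance (s : List Int) (weakly : Bool) : Decidable (Pre_majorized_sequences s weakly) := by
  unfold Pre_majorized_sequences; infer_instance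

def pvWitness_majorized_sequences : List Int × Bool := ([2, 1], true)

def Spec_majorized_sequences (s : List Int) (weakly : Bool) (out : List (List Int)) : Prop := out = majorized_sequences_alt s weakly
instance (s : List Int) (weakly : Bool) (out : List (List Int)) : Decidable (Spec_majorized_sequences s weakly out) := by unfold Spec_majorized_sequences; infer_instance

-- ===== CLAIM (what is proved, stated in full; the proofs are below) =====
def Claim_equal_majorized_sequences : Prop := ∀ (s : List Int) (weakly : Bool), Dom_majorized_sequences s weakly → Pre_majorized_sequences s weakly → Spec_majorized_sequences s weakly (majorized_sequences s weakly)

-- ===== LEMMAS AND PROOFS =====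

def genSeq (m : Int) : Nat → Int → List (List Int)
  | 0, _ => [[]]
  | k+1, v => (PySem.List.pyRange v (m + 1) 1).flatMap (fun w => (genSeq m k w).map (w :: ·))

def preSums (acc : Int) : List Int → List Int
  | [] => []
  | v :: vs => (acc + v) :: preSums (acc + v) vs

def refLoop (w : Bool) : List Int → List Int → Int → Int → Bool
  | [], _, px, py => w || decide (px = py)
  | _ :: _, [], px, py => w || decide (px = py)
  | c :: cs, t :: ts, px, py =>
    if px + c > py + t then false else refLoop w cs ts (px + c) (py + t)

theorem mem_genSeq {m : Int} : ∀ {k : Nat} {v : Int} {c : List Int}, c ∈ genSeq m k v →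
    c.length = k ∧ (∀ x ∈ c, v ≤ x) ∧ c.Pairwise (· ≤ ·) := by
  intro k
  induction k with
  | zero => intro v c hc; simp [genSeq] at hc; simp [hc]
  | succ k ih =>
    intro v c hc
    simp only [genSeq, List.mem_flatMap, List.mem_map] at hc
    obtain ⟨w, hw, e, he, rfl⟩ := hc
    rw [PySem.List.mem_pyRange_one] at hw
    obtain ⟨hlen, hge, hpw⟩ := ih he
    refine ⟨by simp [hlen], ?_, ?_⟩
    · intro x hx
      rcases List.mem_cons.mp hx with rfl | hx
      · exact hw.1
      · exact le_trans hw.1 (hge x hx)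
    · exact List.pairwise_cons.mpr ⟨fun x hx => hge x hx, hpw⟩

theorem sortedRev_eq_reverse {xs : List Int} (h : xs.Pairwise (· ≤ ·)) :
    PySem.List.sorted xs (fun v => v) true = xs.reverse := by
  refine List.Perm.eq_of_pairwise (le := fun a b : Int => b ≤ a)
    (fun a b _ _ h1 h2 => le_antisymm h2 h1)
    (PySem.List.sorted_pairwise_rev xs (fun v => v)) ((List.pairwise_reverse).mpr h)
    ((PySem.List.sorted_perm xs (fun v => v) true).trans xs.reverse_perm.symm)

theorem preAcc_eq : ∀ (t : List Int) (acc : Int) (pre0 : List Int),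
    preAcc t acc pre0 = (pre0 ++ preSums acc t, acc + t.sum) := by
  intro t
  induction t with
  | nil => intro acc pre0; simp [preAcc, preSums]
  | cons v vs ih =>
    intro acc pre0
    simp [preAcc, preSums, ih, List.append_assoc]
    ring

theorem okLoop_eq_ref (w : Bool) (total : Int) : ∀ (c ts : List Int) (ps py : Int),
    c.length = ts.length → total = py + ts.sum →
    okLoop w total (c.zip (preSums py ts)) ps = refLoop w c ts ps py := by
  intro c
  induction c with
  | nil =>
    intro ts ps py hlen htot
    have : ts = [] := by simpa using hlen.symm
    subst this
    simp [okLoop, refLoop, htot]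
  | cons x cs ih =>
    intro ts ps py hlen htot
    match ts with
    | [] => simp at hlen
    | t :: tss =>
      simp only [preSums, List.zip_cons_cons, okLoop, refLoop]
      split_ifs with hgt
      · rfl
      · exact ih tss (ps + x) (py + t) (by simpa using hlen) (by simp at htot ⊢; linarith)

theorem refLoop_false (w : Bool) : ∀ (c ts : List Int) (px py : Int), c ≠ [] →
    c.length = ts.length → py + ts.sum < px + c.sum → refLoop w c ts px py = false := by
  intro c
  induction c with
  | nil => intro ts px py h; exact absurd rfl h
  | cons x cs ih =>
    intro ts px py _ hlen hsum
    match ts with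
    | [] => simp at hlen
    | t :: tss =>
      simp only [refLoop]
      split_ifs with hgt
      · rfl
      · match cs, tss, hlen with
        | [], [], _ => simp at hsum; omega
        | c2 :: cs', t2 :: ts', hlen =>
          exact ih _ (px + x) (py + t) (by simp) (by simpa using hlen)
            (by simp at hsum ⊢; linarith)
        | [], _ :: _, hlen => simp at hlen
        | _ :: _, [], hlen => simp at hlen

theorem sum_ge_length_mul {e : List Int} {v : Int} (h : ∀ x ∈ e, v ≤ x) :
    (e.length : Int) * v ≤ e.sum := by
  induction e with
  | nil => simp
  | cons x xs ih =>
    have h1 := h x (by simp)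
    have h2 := ih (fun y hy => h y (List.mem_cons_of_mem _ hy))
    simp only [List.length_cons, List.sum_cons]
    push_cast
    nlinarith

theorem cwr_pyRange (m : Int) : ∀ (k : Nat) (v : Int),
    cwr (PySem.List.pyRange v (m + 1) 1) k = genSeq m k v := by
  intro k
  induction k with
  | zero => intro v; simp [cwr, genSeq]
  | succ k ih =>
    intro v
    have main : ∀ (d : Nat) (v : Int), (m + 1 - v).toNat = d →
        cwr (PySem.List.pyRange v (m + 1) 1) (k+1) = genSeq m (k+1) v := by
      intro d
      induction d with
      | zero =>
        intro v hd
        have hle : m + 1 ≤ v := by omega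
        rw [PySem.List.pyRange_one_eq_nil hle]
        simp [genSeq, PySem.List.pyRange_one_eq_nil hle, cwr]
      | succ d ihd =>
        intro v hd
        have hlt : v < m + 1 := by omega
        rw [PySem.List.pyRange_one_cons hlt, cwr]
        rw [← PySem.List.pyRange_one_cons hlt, ih v, ihd (v+1) (by omega)]
        conv_rhs => rw [genSeq, PySem.List.pyRange_one_cons hlt]
        simp [genSeq, List.flatMap_cons]
    exact main (m + 1 - v).toNat v rfl

theorem head_sorted_eq_max {s : List Int} {mv : Int}
    (h : PySem.List.max? s (fun v => v) = some mv) :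
    PySem.List.pyGet? (PySem.List.sorted s (fun v => v) true) 0 = some mv := by
  have hne : s ≠ [] := by
    intro hs; subst hs
    exact List.not_mem_nil (PySem.List.max?_mem h)
  have htne : PySem.List.sorted s (fun v => v) true ≠ [] := by
    intro ht; exact hne ((PySem.List.sorted_eq_nil_iff _ _ _).mp ht)
  obtain ⟨c, rest, hct⟩ : ∃ c rest, PySem.List.sorted s (fun v => v) true = c :: rest :=
    List.exists_cons_of_ne_nil htne
  have hcm : c = mv := by
    have h1 : ∀ y ∈ s, y ≤ c := by
      have := PySem.List.key_head_sorted_rev_ge (xs := s) (key := fun v => v) hct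
      simpa using this
    have h2 : ∀ y ∈ s, y ≤ mv := by
      have := PySem.List.max?_isMax h
      simpa using this
    have hcs : c ∈ s := by
      have : c ∈ PySem.List.sorted s (fun v => v) true := by rw [hct]; simp
      exact (PySem.List.mem_sorted _ _ _ _).mp this
    have hms : mv ∈ s := PySem.List.max?_mem h
    exact le_antisymm (h2 c hcs) (h1 mv hms)
  rw [hct, hcm, PySem.List.pyGet?_zero_cons]

theorem majPrefixLoop_eq_ref (sx sy : List Int) (w : Bool) (hlen : sx.length = sy.length) :
    ∀ (d : Nat) (j : Nat) (px py : Int), sx.length - j = d → j ≤ sx.length →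
    majPrefixLoop sx sy w (PySem.List.pyRange (j : Int) (sx.length : Int) 1) px py =
      refLoop w (sx.drop j) (sy.drop j) px py := by
  intro d
  induction d with
  | zero =>
    intro j px py hd hj
    have hje : j = sx.length := by omega
    subst hje
    rw [PySem.List.pyRange_one_eq_nil (by omega)]
    rw [List.drop_length, hlen, List.drop_length]
    rfl
  | succ d ihd =>
    intro j px py hd hj
    have hjlt : j < sx.length := by omega
    have hjy : j < sy.length := by omega
    rw [PySem.List.pyRange_one_cons (by exact_mod_cast hjlt)]
    rw [← List.getElem_cons_drop hjlt, ← List.getElem_cons_drop hjy]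
    simp only [majPrefixLoop, refLoop]
    rw [show ((j : Int) + 1) = ((j + 1 : Nat) : Int) by push_cast; ring]
    have hx : PySem.List.pyGetD sx (j : Int) 0 = sx[j] := by
      simp [PySem.List.pyGetD_natCast, List.getD_eq_getElem?_getD, hjlt]
    have hy : PySem.List.pyGetD sy (j : Int) 0 = sy[j] := by
      simp [PySem.List.pyGetD_natCast, List.getD_eq_getElem?_getD, hjy]
    rw [hx, hy]
    split_ifs with hgt
    · rfl
    · exact ihd (j+1) (px + sx[j]) (py + sy[j]) (by omega) (by omega)

theorem okB_false_of_sum_gt {w : Bool} {t c : List Int} (ht : t ≠ [])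
    (hlen : c.length = t.length) (hsum : t.sum < c.sum) :
    okLoop w t.sum (c.zip (preSums 0 t)) 0 = false := by
  rw [okLoop_eq_ref w t.sum c t 0 0 hlen (by simp)]
  refine refLoop_false w c t 0 0 ?_ hlen (by omega)
  intro hc; subst hc
  simp at hlen
  exact ht (List.eq_nil_of_length_eq_zero hlen.symm)

theorem dfsB_spec (w : Bool) (t : List Int) (m : Int) (ht : t ≠ []) :
    ∀ (k : Nat) (prev q : Int) (rev : List Int) (res : List (List Int)),
    rev.length + k = t.length → (∀ x ∈ rev, x ≤ prev) → q = rev.sum →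
    dfsB w (preSums 0 t) t.sum m k prev q rev res =
      res ++ ((genSeq m k prev).filter
          (fun e => okLoop w t.sum ((e.reverse ++ rev).zip (preSums 0 t)) 0)).map
        (fun e => e.reverse ++ rev) := by
  intro k
  induction k with
  | zero =>
    intro prev q rev res hlen hle hq
    simp only [dfsB, genSeq, List.filter, List.reverse_nil, List.nil_append]
    split_ifs with hok
    · simp [hok]
    · simp [hok]
  | succ k ih =>
    intro prev q rev res hlen hle hq
    rw [dfsB]
    have main : ∀ (d : Nat) (v : Int) (res : List (List Int)), (m + 1 - v).toNat = d →
        (∀ x ∈ rev, x ≤ v) →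
        dfsLoop w (preSums 0 t) t.sum m k (PySem.List.pyRange v (m + 1) 1) q rev res =
          res ++ ((genSeq m (k+1) v).filter
              (fun e => okLoop w t.sum ((e.reverse ++ rev).zip (preSums 0 t)) 0)).map
            (fun e => e.reverse ++ rev) := by
      intro d
      induction d with
      | zero =>
        intro v res hd _
        have hle' : m + 1 ≤ v := by omega
        rw [PySem.List.pyRange_one_eq_nil hle']
        simp [dfsLoop, genSeq, PySem.List.pyRange_one_eq_nil hle']
      | succ d ihd =>
        intro v res hd hlev
        have hlt : v < m + 1 := by omega
        rw [PySem.List.pyRange_one_cons hlt, dfsLoop]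
        have hgen : genSeq m (k+1) v =
            (genSeq m k v).map (v :: ·) ++ genSeq m (k+1) (v+1) := by
          conv_lhs => rw [genSeq, PySem.List.pyRange_one_cons hlt]
          rw [List.flatMap_cons]
          congr 1
        split_ifs with hprune
        · -- break: every remaining candidate exceeds the total prefix-sum bound
          have hall : ∀ e ∈ genSeq m (k+1) v,
              okLoop w t.sum ((e.reverse ++ rev).zip (preSums 0 t)) 0 = false := by
            intro e he
            obtain ⟨helen, hege, _⟩ := mem_genSeq he
            refine okB_false_of_sum_gt ht (by simp [helen]; omega) ?_
            have h1 : ((k : Int) + 1) * v ≤ e.sum := by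
              have := sum_ge_length_mul hege
              rw [helen] at this
              push_cast at this ⊢
              linarith
            simp only [List.sum_append, List.sum_reverse]
            have h2 : v * ((k : Int) + 1) = ((k : Int) + 1) * v := mul_comm _ _
            linarith
          have : (genSeq m (k+1) v).filter
              (fun e => okLoop w t.sum ((e.reverse ++ rev).zip (preSums 0 t)) 0) = [] := by
            rw [List.filter_eq_nil_iff]
            intro e he
            simp [hall e he]
          simp [this]
        · rw [ih v (q + v) (v :: rev) res (by simp; omega)
            (by intro x hx
                rcases List.mem_cons.mp hx with rfl | hx
                · exact le_refl x
                · exact hlev x hx)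
            (by simp [hq]; omega)]
          rw [ihd (v+1) _ (by omega) (fun x hx => le_trans (hlev x hx) (by omega))]
          rw [hgen, List.filter_append, List.map_append, List.append_assoc]
          congr 1
          rw [List.filter_map, List.map_map]
          have hcomp : ∀ (l : List (List Int)),
              (l.filter ((fun e => okLoop w t.sum ((e.reverse ++ rev).zip (preSums 0 t)) 0) ∘ (v :: ·))).map
                ((fun e => e.reverse ++ rev) ∘ (v :: ·)) =
              (l.filter (fun e => okLoop w t.sum ((e.reverse ++ (v :: rev)).zip (preSums 0 t)) 0)).map
                (fun e => e.reverse ++ (v :: rev)) := by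
            intro l
            congr 1
            · funext e
              simp [Function.comp, List.reverse_cons, List.append_assoc]
            · apply List.filter_congr
              intro e _
              simp [Function.comp, List.reverse_cons, List.append_assoc]
          rw [hcomp]
    exact main (m + 1 - prev).toNat prev res rfl hle

theorem final_eq (s : List Int) (w : Bool) (hpre : s ≠ []) :
    majorized_sequences s w = majorized_sequences_alt s w := by
  obtain ⟨mv, hmv⟩ : ∃ mv, PySem.List.max? s (fun v => v) = some mv := by
    cases h : PySem.List.max? s (fun v => v) with
    | none => exact absurd ((PySem.List.max?_eq_none_iff s _).mp h) hpre
    | some mv => exact ⟨mv, rfl⟩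
  have hget := head_sorted_eq_max hmv
  have ht : PySem.List.sorted s (fun v => v) true ≠ [] := by
    intro h0; exact hpre ((PySem.List.sorted_eq_nil_iff _ _ _).mp h0)
  set t := PySem.List.sorted s (fun v => v) true with hT
  have htlen : t.length = s.length := PySem.List.length_sorted s _ true
  unfold majorized_sequences majorized_sequences_alt
  rw [hmv]
  simp only [preAcc_eq, List.nil_append, ← hT, hget, zero_add]
  -- B side: the DFS enumerates the filtered reversals
  rw [dfsB_spec w t mv ht s.length 0 0 [] [] (by simpa using htlen.symm)
      (by intro x hx; simp at hx) (by simp)]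
  simp only [List.append_nil, List.nil_append]
  -- A side: the exhaustive loop is the same filtered list
  rw [cwr_pyRange mv s.length 0]
  rw [PySem.List.foldl_congr_mem (genSeq mv s.length 0) _
      (fun res c => if okLoop w t.sum (c.reverse.zip (preSums 0 t)) 0
        then res ++ [c.reverse] else res) []
      (by
        intro res c hc
        obtain ⟨hclen, hcge, hcpw⟩ := mem_genSeq hc
        have hrev : PySem.List.sorted c (fun v => v) true = c.reverse :=
          sortedRev_eq_reverse hcpw
        rw [hrev]
        have hcrlen : c.reverse.length = t.length := by simp [hclen, htlen]
        have hmaj : is_majorized c.reverse s w =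
            some (okLoop w t.sum (c.reverse.zip (preSums 0 t)) 0) := by
          unfold is_majorized
          rw [if_neg (by simp [PySem.List.len_eq, hclen])]
          congr 1
          have hss : PySem.List.sorted c.reverse (fun v => v) true = c.reverse :=
            PySem.List.sorted_rev_eq_self_of_pairwise c.reverse (fun v => v)
              (by simpa [List.pairwise_reverse] using hcpw)
          rw [hss, ← hT]
          have h1 := majPrefixLoop_eq_ref c.reverse t w hcrlen c.reverse.length 0 0 0
            (by omega) (by omega)
          simp only [List.drop_zero, Nat.cast_zero] at h1
          simp only [PySem.List.len_eq, List.length_reverse] at *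
          rw [h1]
          rw [okLoop_eq_ref w t.sum c.reverse t 0 0 (by simp [hclen, htlen]) (by simp)]
        rw [hmaj])]
  rw [PySem.List.foldl_append_if (fun c => okLoop w t.sum (c.reverse.zip (preSums 0 t)) 0)
      (fun c => c.reverse) (genSeq mv s.length 0) []]
  simp

-- ===== VERDICT (by name: the statement is the Claim_ definition above) =====
theorem majorized_sequences_spec : Claim_equal_majorized_sequences := by
  intro s weakly _dom hpre
  unfold Spec_majorized_sequences
  exact final_eq s weakly hpre
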